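-- pv_equiv track=rewrite | github.com/chakraa1/Data-Structures-and-Algorithms | Arrays/Subarrays/SubarrayWithLeastAverage.py | SubArrayWithLeastAveragePrefixSum
-- ===== SOURCE A (Python) =====
-- def SubArrayWithLeastAveragePrefixSum(A,B):
--     n = len(A)
--     avg = sum(A) // n
--     ans = -1
--     p = [A[0]]
--     for x in A[1:]:
--         p.append(p[-1] + x)
--     for s in range(n - B + 1):
--         e = B + s - 1
--         total=0
--         if s==0:
--             total=p[e]
--         else:
--             total = p[e]-p[s-1]
--         avg_b_size = total // B
--         if avg_b_size < avg:
--             ans = s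
--     return ans
-- ===== SOURCE B (Python) =====
-- def SubArrayWithLeastAveragePrefixSum(A, B):
--     avg = sum(A) // len(A)
--     good = [s for s in range(len(A) - B + 1)
--             if sum(A[s:s + B]) // B < avg]
--     return good[-1] if good else -1
-- ===== Notes on version B (the rewrite author's own statement) =====
-- stated objective: simpler
-- what changed: Drops the materialized prefix-sum table and the mutable last-match accumulator: B sums each window directly from a slice, collects the qualifying start indices with a comprehension, and returns the last one (or -1).
import Mathlib
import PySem

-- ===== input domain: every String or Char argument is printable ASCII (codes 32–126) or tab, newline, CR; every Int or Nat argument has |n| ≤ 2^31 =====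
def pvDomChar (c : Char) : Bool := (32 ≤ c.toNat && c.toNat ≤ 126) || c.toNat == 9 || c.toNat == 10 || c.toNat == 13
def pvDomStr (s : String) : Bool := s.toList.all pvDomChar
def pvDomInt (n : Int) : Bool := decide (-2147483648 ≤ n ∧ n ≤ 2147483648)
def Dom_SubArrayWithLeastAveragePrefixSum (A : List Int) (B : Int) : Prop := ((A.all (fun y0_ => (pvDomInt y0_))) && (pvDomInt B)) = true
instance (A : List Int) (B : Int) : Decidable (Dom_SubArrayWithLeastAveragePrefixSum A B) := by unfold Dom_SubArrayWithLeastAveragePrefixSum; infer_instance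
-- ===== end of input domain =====

-- B drops A's materialized prefix-sum table and mutable last-match accumulator: it sums each
-- window directly from a slice, filters the qualifying starts, and takes the last (objective: simpler).


-- ===== PORT A =====
def SubArrayWithLeastAveragePrefixSum (A : List Int) (B : Int) : Int :=
  let n : Int := PySem.List.len A
  let avg := PySem.Int.floordiv A.sum n
  let p : List Int := (PySem.List.slice A (some 1) none).foldl
      (fun p x => p ++ [PySem.List.pyGetD p (-1) 0 + x]) [PySem.List.pyGetD A 0 0]
  (PySem.List.pyRange 0 (n - B + 1) 1).foldl (fun ans s =>
      let e := B + s - 1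
      let total : Int := if s = 0 then PySem.List.pyGetD p e 0
                         else PySem.List.pyGetD p e 0 - PySem.List.pyGetD p (s - 1) 0
      let avg_b_size := PySem.Int.floordiv total B
      if avg_b_size < avg then s else ans) (-1)

-- ===== PORT B =====
def SubArrayWithLeastAveragePrefixSum_alt (A : List Int) (B : Int) : Int :=
  let avg := PySem.Int.floordiv A.sum (PySem.List.len A)
  let good := (PySem.List.pyRange 0 (PySem.List.len A - B + 1) 1).filter
      (fun s => PySem.Int.floordiv (PySem.List.slice A (some s) (some (s + B))).sum B < avg)
  good.getLast?.getD (-1)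

-- ===== PRECONDITION & SPEC =====
-- Pre_ excludes exactly the inputs where the Python A raises: the empty list (ZeroDivisionError
-- computing the overall average) and every B ≤ 0 (ZeroDivisionError for B = 0; IndexError for
-- B < 0, since the loop index s reaches n - B > n and p[s-1] overruns the prefix table).
def Pre_SubArrayWithLeastAveragePrefixSum (A : List Int) (B : Int) : Prop := A ≠ [] ∧ 1 ≤ B
instance (A : List Int) (B : Int) : Decidable (Pre_SubArrayWithLeastAveragePrefixSum A B) := by unfold Pre_SubArrayWithLeastAveragePrefixSum; infer_instance
def pvWitness_SubArrayWithLeastAveragePrefixSum : List Int × Int := ([3, 1, 2], 1)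

def Spec_SubArrayWithLeastAveragePrefixSum (A : List Int) (B : Int) (out : Int) : Prop := out = SubArrayWithLeastAveragePrefixSum_alt A B
instance (A : List Int) (B : Int) (out : Int) : Decidable (Spec_SubArrayWithLeastAveragePrefixSum A B out) := by unfold Spec_SubArrayWithLeastAveragePrefixSum; infer_instance

-- ===== CLAIM (what is proved, stated in full; the proofs are below) =====
def Claim_equal_SubArrayWithLeastAveragePrefixSum : Prop := ∀ (A : List Int) (B : Int), Dom_SubArrayWithLeastAveragePrefixSum A B → Pre_SubArrayWithLeastAveragePrefixSum A B → Spec_SubArrayWithLeastAveragePrefixSum A B (SubArrayWithLeastAveragePrefixSum A B)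

-- ===== LEMMAS AND PROOFS =====

/-- A last-match fold equals the last element of the filtered list (with the initial value as default). -/
lemma fold_last_filter (c : Int → Prop) [DecidablePred c] :
    ∀ (l : List Int) (init : Int),
      l.foldl (fun a s => if c s then s else a) init
        = ((l.filter (fun s => decide (c s))).getLast?).getD init := by
  intro l
  induction l with
  | nil => intro init; simp
  | cons x t ih =>
    intro init
    simp only [List.foldl_cons, List.filter_cons]
    by_cases hx : c x
    · simp only [hx, if_pos, ih]
      cases h : (t.filter (fun s => decide (c s))).getLast? with
      | none => simp [List.getLast?_cons, h]
      | some y => simp [List.getLast?_cons, h]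
    · simp [hx, ih]

/-- The prefix-sum construction of A's loop, characterized pointwise. -/
lemma prefix_build (a : Int) (l : List Int) :
    l.foldl (fun p x => p ++ [PySem.List.pyGetD p (-1) 0 + x]) [a]
      = (List.range (l.length + 1)).map (fun i => ((a :: l).take (i + 1)).sum) := by
  induction l using List.reverseRecOn with
  | nil => simp
  | append_singleton t x ih =>
    rw [List.foldl_append, List.foldl_cons, List.foldl_nil, ih]
    have hlast : PySem.List.pyGetD ((List.range (t.length + 1)).map
        (fun i => ((a :: t).take (i + 1)).sum)) (-1) 0 = (a :: t).sum := by
      rw [List.range_succ, List.map_append, List.map_singleton,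
          PySem.List.pyGetD_neg_one_append_singleton,
          List.take_of_length_le (by simp)]
    rw [hlast]
    have hlen : (t ++ [x]).length + 1 = t.length + 1 + 1 := by simp
    rw [hlen]
    conv_rhs => rw [List.range_succ, List.map_append, List.map_singleton]
    congr 1
    · refine (List.map_eq_map_iff.mpr ?_).symm
      intro i hi
      have hi' : i + 1 ≤ (a :: t).length := by
        simp only [List.mem_range] at hi; simp; omega
      show ((a :: (t ++ [x])).take (i + 1)).sum = ((a :: t).take (i + 1)).sum
      rw [show a :: (t ++ [x]) = (a :: t) ++ [x] from rfl,
          List.take_append_of_le_length hi']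
    · rw [show a :: (t ++ [x]) = (a :: t) ++ [x] from rfl,
          List.take_of_length_le (by simp)]
      simp [add_assoc]

/-- The window total A reads off the prefix table equals the slice sum B computes. -/
lemma window_eq (a : Int) (l : List Int) (B s : Int) (hB : 1 ≤ B) (hs : 0 ≤ s)
    (hsn : s < (l.length : Int) + 1 - B + 1) :
    (if s = 0 then
        PySem.List.pyGetD ((List.range (l.length + 1)).map
          (fun i => ((a :: l).take (i + 1)).sum)) (B + s - 1) 0
      else
        PySem.List.pyGetD ((List.range (l.length + 1)).map
          (fun i => ((a :: l).take (i + 1)).sum)) (B + s - 1) 0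
        - PySem.List.pyGetD ((List.range (l.length + 1)).map
          (fun i => ((a :: l).take (i + 1)).sum)) (s - 1) 0)
      = (PySem.List.slice (a :: l) (some s) (some (s + B))).sum := by
  have hget : ∀ (j : Int), 0 ≤ j → j < (l.length : Int) + 1 →
      PySem.List.pyGetD ((List.range (l.length + 1)).map
        (fun i => ((a :: l).take (i + 1)).sum)) j 0
        = ((a :: l).take (j.toNat + 1)).sum := by
    intro j hj0 hjn
    rw [PySem.List.pyGetD_eq_getElem _ 0 hj0 (by simpa using hjn)]
    rw [List.getElem_map, List.getElem_range]
  have hsl : PySem.List.slice (a :: l) (some s) (some (s + B))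
      = ((a :: l).drop s.toNat).take B.toNat := by
    rw [PySem.List.slice_toNat _ hs (by omega)]
    congr 1
    omega
  rw [hsl]
  have hBn : (B + s - 1).toNat + 1 = s.toNat + B.toNat := by omega
  have htake : ((a :: l).take (s.toNat + B.toNat)).sum
      = ((a :: l).take s.toNat).sum + (((a :: l).drop s.toNat).take B.toNat).sum := by
    rw [List.take_add, List.sum_append]
  by_cases h0 : s = 0
  · subst h0
    rw [if_pos rfl, hget _ (by omega) (by omega), hBn]
    rw [htake]
    simp
  · rw [if_neg h0, hget _ (by omega) (by omega), hget _ (by omega) (by omega), hBn]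
    have : (s - 1).toNat + 1 = s.toNat := by omega
    rw [this, htake]
    ring

-- ===== VERDICT (by name: the statement is the Claim_ definition above) =====
theorem SubArrayWithLeastAveragePrefixSum_spec : Claim_equal_SubArrayWithLeastAveragePrefixSum := by
  intro A B _ hPre
  obtain ⟨hne, hB⟩ := hPre
  obtain ⟨a, l, rfl⟩ : ∃ a l, A = a :: l := by
    cases A with
    | nil => exact absurd rfl hne
    | cons a l => exact ⟨a, l, rfl⟩
  show SubArrayWithLeastAveragePrefixSum (a :: l) B = SubArrayWithLeastAveragePrefixSum_alt (a :: l) B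
  unfold SubArrayWithLeastAveragePrefixSum SubArrayWithLeastAveragePrefixSum_alt
  simp only [PySem.List.slice_from_one, List.tail_cons, PySem.List.pyGetD_zero_cons,
    PySem.List.len_eq, List.length_cons, Nat.cast_add, Nat.cast_one, prefix_build]
  rw [List.foldl_ext _ (fun ans s => if PySem.Int.floordiv
        (PySem.List.slice (a :: l) (some s) (some (s + B))).sum B
        < PySem.Int.floordiv (a :: l).sum ((l.length : Int) + 1) then s else ans) (-1)
      (by
        intro b s hsmem
        rw [PySem.List.mem_pyRange_one] at hsmem
        simp only []
        rw [window_eq a l B s hB hsmem.1 (by omega)])]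
  rw [fold_last_filter]
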